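-- pv_equiv track=rewrite | github.com/kimgyejung26/dating-app | lib/ai_recommend_model/seolleyeon_meeting_common_v1.py | has_cross_block_pair
-- ===== SOURCE A (Python) =====
-- from typing import Any, Dict, Iterator, List, Mapping, Optional, Sequence, Set, Tuple
--
-- def has_cross_block_pair(
--     left_member_uids: Sequence[str],
--     right_member_uids: Sequence[str],
--     blocked_pairs: Set[Tuple[str, str]],
-- ) -> bool:
--     for left_uid in left_member_uids:
--         for right_uid in right_member_uids:
--             if tuple(sorted((left_uid, right_uid))) in blocked_pairs:
--                 return True
--     return False
-- ===== SOURCE B (Python) =====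
-- from typing import Sequence, Set, Tuple
--
-- def has_cross_block_pair(
--     left_member_uids: Sequence[str],
--     right_member_uids: Sequence[str],
--     blocked_pairs: Set[Tuple[str, str]],
-- ) -> bool:
--     left = set(left_member_uids)
--     right = set(right_member_uids)
--     for pair in blocked_pairs:
--         if len(pair) != 2:  # skip malformed entries
--             continue
--         a, b = pair
--         if (a in left and b in right) or (a in right and b in left):
--             return True
--     return False
-- ===== Notes on version B (the rewrite author's own statement) =====
-- stated objective: faster
-- what changed: Instead of testing every left/right combination against the blocked set, B builds hash sets of the two member groups and scans blocked_pairs once, checking each well-formed 2-tuple for cross-membership (entries of other lengths are skipped; A can never match them either).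
-- intended difference: On inputs where some unsorted blocked entry (a,b) with a>b links the two groups while no sorted entry does, A returns False (it only ever looks up sorted tuples, so an unsorted entry can never match) and B returns True; B's is intended because the entry plainly names a blocked pair spanning the groups. — e.g. on has_cross_block_pair(["x"], ["y"], [["y", "x"]]): A returns false, B returns true
import Mathlib
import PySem

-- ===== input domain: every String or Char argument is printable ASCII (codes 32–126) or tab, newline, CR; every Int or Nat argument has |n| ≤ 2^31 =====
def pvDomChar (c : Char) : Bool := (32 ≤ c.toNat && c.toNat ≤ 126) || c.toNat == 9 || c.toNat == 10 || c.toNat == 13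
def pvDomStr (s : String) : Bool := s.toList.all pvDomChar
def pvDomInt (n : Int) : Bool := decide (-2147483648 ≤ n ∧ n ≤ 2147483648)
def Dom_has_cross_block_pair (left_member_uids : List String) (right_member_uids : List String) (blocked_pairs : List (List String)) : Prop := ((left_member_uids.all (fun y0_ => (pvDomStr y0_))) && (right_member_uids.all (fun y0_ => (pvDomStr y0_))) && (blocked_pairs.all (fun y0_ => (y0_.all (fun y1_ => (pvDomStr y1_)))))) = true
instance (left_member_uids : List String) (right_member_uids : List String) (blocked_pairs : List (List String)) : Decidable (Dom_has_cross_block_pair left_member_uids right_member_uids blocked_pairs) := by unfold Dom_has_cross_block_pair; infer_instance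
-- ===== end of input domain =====

-- B replaces A's nested loop over all left×right combinations (one blocked-set lookup each)
-- by hash sets of the two member groups and a single pass over blocked_pairs.

-- ===== PORT A =====
-- for left_uid in L: for right_uid in R: if tuple(sorted((l, r))) in blocked_pairs: return True
def has_cross_block_pair (left_member_uids : List String) (right_member_uids : List String) (blocked_pairs : List (List String)) : Bool :=
  left_member_uids.any (fun left_uid =>
    right_member_uids.any (fun right_uid =>
      blocked_pairs.contains (PySem.List.sorted [left_uid, right_uid] (fun x => x) false)))

-- ===== PORT B =====
-- left = set(L); right = set(R); for pair in blocked_pairs: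
--   if len(pair) != 2: continue;  a, b = pair
--   if (a in left and b in right) or (a in right and b in left): return True
-- (the 'len(pair) == 2' test plus 'a, b = pair' unpacking is the match on the two-element shape)
def has_cross_block_pair_alt (left_member_uids : List String) (right_member_uids : List String) (blocked_pairs : List (List String)) : Bool :=
  let left : PySem.Set String := PySem.Set.ofList left_member_uids
  let right : PySem.Set String := PySem.Set.ofList right_member_uids
  blocked_pairs.any (fun pair =>
    match pair with
    | [a, b] => (left.contains a && right.contains b) || (right.contains a && left.contains b)
    | _ => false)

-- ===== PRECONDITION & SPEC =====
-- does a blocked entry [a, b] with a ≤ b link the two groups?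
def pvSortedCross (L R : List String) (p : List String) : Bool :=
  p.length == 2 && decide (p.headD "" ≤ p.getLastD "") &&
    (L.contains (p.headD "") && R.contains (p.getLastD "") ||
     R.contains (p.headD "") && L.contains (p.getLastD ""))

-- does a blocked entry [a, b] with b < a (unsorted) link the two groups?
def pvUnsortedCross (L R : List String) (p : List String) : Bool :=
  p.length == 2 && decide (p.getLastD "" < p.headD "") &&
    (L.contains (p.headD "") && R.contains (p.getLastD "") ||
     R.contains (p.headD "") && L.contains (p.getLastD "")) 

-- On inputs whose blocked set links the two groups only through an unsorted entry (b < a),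
-- A returns false (it only ever looks up sorted tuples, so such an entry never matches) while
-- B returns true; B's is the intended value since the entry plainly names a blocked cross pair.
def D_has_cross_block_pair (left_member_uids : List String) (right_member_uids : List String) (blocked_pairs : List (List String)) : Prop :=
  blocked_pairs.any (pvUnsortedCross left_member_uids right_member_uids) = true ∧
  blocked_pairs.any (pvSortedCross left_member_uids right_member_uids) = false
instance (left_member_uids : List String) (right_member_uids : List String) (blocked_pairs : List (List String)) : Decidable (D_has_cross_block_pair left_member_uids right_member_uids blocked_pairs) := by unfold D_has_cross_block_pair; infer_instance

def Spec_has_cross_block_pair (left_member_uids : List String) (right_member_uids : List String) (blocked_pairs : List (List String)) (out : Bool) : Prop := ¬ D_has_cross_block_pair left_member_uids right_member_uids blocked_pairs → out = has_cross_block_pair_alt left_member_uids right_member_uids blocked_pairs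
instance (left_member_uids : List String) (right_member_uids : List String) (blocked_pairs : List (List String)) (out : Bool) : Decidable (Spec_has_cross_block_pair left_member_uids right_member_uids blocked_pairs out) := by unfold Spec_has_cross_block_pair; infer_instance

def pvDiffWitness_has_cross_block_pair : List String × List String × List (List String) := (["x"], ["y"], [["y", "x"]])
def pvDiffWitnessOut_has_cross_block_pair : Bool × Bool := (false, true)

-- ===== CLAIM (what is proved, stated in full; the proofs are below) =====
def Claim_unchanged_has_cross_block_pair : Prop := ∀ (left_member_uids : List String) (right_member_uids : List String) (blocked_pairs : List (List String)), Dom_has_cross_block_pair left_member_uids right_member_uids blocked_pairs → Spec_has_cross_block_pair left_member_uids right_member_uids blocked_pairs (has_cross_block_pair left_member_uids right_member_uids blocked_pairs)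
def Claim_changed_has_cross_block_pair : Prop := Dom_has_cross_block_pair (pvDiffWitness_has_cross_block_pair.1) (pvDiffWitness_has_cross_block_pair.2.1) (pvDiffWitness_has_cross_block_pair.2.2) ∧ D_has_cross_block_pair (pvDiffWitness_has_cross_block_pair.1) (pvDiffWitness_has_cross_block_pair.2.1) (pvDiffWitness_has_cross_block_pair.2.2) ∧ has_cross_block_pair (pvDiffWitness_has_cross_block_pair.1) (pvDiffWitness_has_cross_block_pair.2.1) (pvDiffWitness_has_cross_block_pair.2.2) = pvDiffWitnessOut_has_cross_block_pair.1 ∧ has_cross_block_pair_alt (pvDiffWitness_has_cross_block_pair.1) (pvDiffWitness_has_cross_block_pair.2.1) (pvDiffWitness_has_cross_block_pair.2.2) = pvDiffWitnessOut_has_cross_block_pair.2 ∧ pvDiffWitnessOut_has_cross_block_pair.1 ≠ pvDiffWitnessOut_has_cross_block_pair.2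
def Claim_exact_has_cross_block_pair : Prop := ∀ (left_member_uids : List String) (right_member_uids : List String) (blocked_pairs : List (List String)), Dom_has_cross_block_pair left_member_uids right_member_uids blocked_pairs → D_has_cross_block_pair left_member_uids right_member_uids blocked_pairs → has_cross_block_pair left_member_uids right_member_uids blocked_pairs ≠ has_cross_block_pair_alt left_member_uids right_member_uids blocked_pairs

-- ===== LEMMAS AND PROOFS =====

-- sorted of a two-element list, explicitly
theorem sorted_pair (l r : String) :
    PySem.List.sorted [l, r] (fun x => x) false = if l ≤ r then [l, r] else [r, l] := by
  split_ifs with h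
  · exact PySem.List.sorted_id_eq_of_perm_of_pairwise _ _ (List.Perm.refl _) (by simpa using h)
  · exact PySem.List.sorted_id_eq_of_perm_of_pairwise _ _ (List.Perm.swap l r [])
      (by simpa using le_of_not_ge h)

-- A returns true exactly when some sorted blocked entry links the two groups
theorem portA_eq_anySorted (L R : List String) (Bp : List (List String)) :
    has_cross_block_pair L R Bp = Bp.any (pvSortedCross L R) := by
  unfold has_cross_block_pair
  rw [Bool.eq_iff_iff]; simp only [List.any_eq_true]
  constructor
  · rintro ⟨l, hl, r, hr, hmem⟩
    rw [List.contains_iff_mem, sorted_pair] at hmem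
    split_ifs at hmem with h
    · exact ⟨[l, r], hmem, by simp [pvSortedCross, h, hl, hr]⟩
    · exact ⟨[r, l], hmem, by
        simp [pvSortedCross, le_of_not_ge h, hl, hr]⟩
  · rintro ⟨p, hp, hpred⟩
    match p with
    | [] => simp [pvSortedCross] at hpred
    | [_] => simp [pvSortedCross] at hpred
    | _ :: _ :: _ :: _ => simp [pvSortedCross] at hpred
    | [a, b] =>
      have hgl : ([a, b].getLastD "") = b := rfl
      have hhd : ([a, b].headD "") = a := rfl
      simp only [pvSortedCross, hgl, hhd, List.length_cons, List.length_nil,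
        Bool.and_eq_true, beq_iff_eq, decide_eq_true_eq, Bool.or_eq_true,
        List.contains_iff_mem] at hpred
      obtain ⟨⟨-, hab⟩, hc⟩ := hpred
      rcases hc with ⟨ha, hb⟩ | ⟨ha, hb⟩
      · exact ⟨a, ha, b, hb, by rw [List.contains_iff_mem, sorted_pair, if_pos hab]; exact hp⟩
      · refine ⟨b, hb, a, ha, ?_⟩
        rw [List.contains_iff_mem, sorted_pair]
        split_ifs with h2
        · have : a = b := le_antisymm hab h2
          subst this; exact hp
        · exact hp

-- B returns true exactly when some blocked entry, sorted or not, links the two groups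
theorem portB_eq_any (L R : List String) (Bp : List (List String)) :
    has_cross_block_pair_alt L R Bp
      = Bp.any (fun p => pvSortedCross L R p || pvUnsortedCross L R p) := by
  unfold has_cross_block_pair_alt
  simp only []
  congr 1; funext p
  match p with
  | [] => simp [pvSortedCross, pvUnsortedCross]
  | [_] => simp [pvSortedCross, pvUnsortedCross]
  | _ :: _ :: _ :: _ => simp [pvSortedCross, pvUnsortedCross]
  | [a, b] =>
    simp only [pvSortedCross, pvUnsortedCross]
    have hcontL : ∀ x, (PySem.Set.ofList L).contains x = L.contains x := by
      intro x
      simp [PySem.Set.contains, PySem.Set.mem_ofList]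
    have hcontR : ∀ x, (PySem.Set.ofList R).contains x = R.contains x := by
      intro x
      simp [PySem.Set.contains, PySem.Set.mem_ofList]
    rw [hcontL a, hcontL b, hcontR a, hcontR b]
    by_cases h : a ≤ b
    · simp [h, not_lt.mpr h]
    · simp [h, lt_of_not_ge h]

theorem any_or_split (L R : List String) (Bp : List (List String)) :
    Bp.any (fun p => pvSortedCross L R p || pvUnsortedCross L R p)
      = (Bp.any (pvSortedCross L R) || Bp.any (pvUnsortedCross L R)) := by
  induction Bp with
  | nil => rfl
  | cons p t ih =>
    simp only [List.any_cons, ih]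
    cases pvSortedCross L R p <;> cases pvUnsortedCross L R p <;> simp

-- ===== VERDICT (by name: the statement is the Claim_ definition above) =====
theorem has_cross_block_pair_spec : Claim_unchanged_has_cross_block_pair := by
  intro L R Bp _
  unfold Spec_has_cross_block_pair
  intro hnD
  unfold D_has_cross_block_pair at hnD
  rw [portA_eq_anySorted, portB_eq_any, any_or_split]
  cases hS : Bp.any (pvSortedCross L R) with
  | true => simp
  | false =>
    cases hU : Bp.any (pvUnsortedCross L R) with
    | false => simp
    | true => exact absurd ⟨hU, hS⟩ hnD

theorem has_cross_block_pair_changed : Claim_changed_has_cross_block_pair := by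
  unfold Claim_changed_has_cross_block_pair
  have hxy : ("x" : String) < "y" := String.lt_iff_toList_lt.mpr (by decide)
  refine ⟨by decide, ⟨?_, ?_⟩, ?_, ?_, by decide⟩
  · simp [pvDiffWitness_has_cross_block_pair, pvUnsortedCross, hxy]
  · simp [pvDiffWitness_has_cross_block_pair, pvSortedCross, not_le.mpr hxy]
  · have hs : PySem.List.sorted ["x", "y"] (fun x => x) false = ["x", "y"] :=
      PySem.List.sorted_eq_self_of_pairwise _ _ (by simp; decide)
    simp [pvDiffWitness_has_cross_block_pair, pvDiffWitnessOut_has_cross_block_pair,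
      has_cross_block_pair, hs]
  · simp [pvDiffWitness_has_cross_block_pair, pvDiffWitnessOut_has_cross_block_pair,
      has_cross_block_pair_alt, PySem.Set.contains, PySem.Set.mem_ofList]

theorem has_cross_block_pair_tight : Claim_exact_has_cross_block_pair := by
  intro L R Bp _ hD
  obtain ⟨hU, hS⟩ := hD
  rw [portA_eq_anySorted, portB_eq_any, any_or_split, hS, hU]
  simp
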